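-- pv_equiv track=rewrite | github.com/ricpdc/elastic-pricing | clustering/utils.py | determine_graph_limits
-- ===== SOURCE A (Python) =====
-- def determine_graph_limits(product_prices):
--     # Calculate the total number of distinct products
--     num_products = len(set(p[0] for p in product_prices))
--
--     # Calculate the maximum number of prices per product
--     max_prices_per_product = max(
--         len([p for p in product_prices if p[0] == prod])
--         for prod in set(p[0] for p in product_prices)
--     )
--
--     # Define the maximum allowable size of subgraphs based on the max prices per product
--     if max_prices_per_product == 1:
--         max_size = 175
--     elif max_prices_per_product <= 2:
--         max_size = 85
--     elif max_prices_per_product <= 3: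
--         max_size = 55
--     elif max_prices_per_product <= 4:
--         max_size = 40
--     elif max_prices_per_product <= 5:
--         max_size = 35
--     elif max_prices_per_product <= 7:
--         max_size = 25
--     elif max_prices_per_product <= 8:
--         max_size = 20
--     elif max_prices_per_product <= 11:
--         max_size = 15
--     elif max_prices_per_product <= 17:
--         max_size = 10
--     elif max_prices_per_product <= 35:
--         max_size = 5
--     else:
--         raise ValueError(f"Too many prices per product.")
--
--     return num_products, max_prices_per_product, max_size
-- ===== SOURCE B (Python) =====
-- def determine_graph_limits(product_prices):
--     # One pass: count prices per product in a dict.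
--     counts = {}
--     for p in product_prices:
--         counts[p[0]] = counts.get(p[0], 0) + 1
--     num_products = len(counts)
--     max_prices_per_product = max(counts.values())
--     # Breakpoint table instead of the if/elif cascade.
--     for limit, size in ((1, 175), (2, 85), (3, 55), (4, 40), (5, 35),
--                         (7, 25), (8, 20), (11, 15), (17, 10), (35, 5)):
--         if max_prices_per_product <= limit:
--             return num_products, max_prices_per_product, size
--     raise ValueError("Too many prices per product.")
-- ===== Notes on version B (the rewrite author's own statement) =====
-- stated objective: faster
-- what changed: One dict-counting pass replaces A's per-distinct-product rescans of the whole list, and a breakpoint (limit,size) table scan replaces the if/elif cascade; the empty-input and >35-prices ValueErrors are preserved and excluded by Pre_.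
import Mathlib
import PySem

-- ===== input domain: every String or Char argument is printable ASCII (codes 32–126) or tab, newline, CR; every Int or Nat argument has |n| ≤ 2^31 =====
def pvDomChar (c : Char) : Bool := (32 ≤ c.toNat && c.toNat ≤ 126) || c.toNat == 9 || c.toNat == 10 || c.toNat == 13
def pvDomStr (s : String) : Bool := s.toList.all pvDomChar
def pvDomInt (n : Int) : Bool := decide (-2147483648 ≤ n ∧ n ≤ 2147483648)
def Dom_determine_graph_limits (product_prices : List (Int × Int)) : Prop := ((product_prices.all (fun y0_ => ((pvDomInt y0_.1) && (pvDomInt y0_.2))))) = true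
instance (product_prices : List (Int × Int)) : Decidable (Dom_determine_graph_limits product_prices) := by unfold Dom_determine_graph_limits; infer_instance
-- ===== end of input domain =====

-- B replaces A's nested scans (a count pass per distinct product) by one dict-counting pass,
-- and the if/elif cascade by a breakpoint table scan (objective: faster, asymptotic).

-- ===== PORT A =====
-- A's if/elif cascade on max_prices_per_product; the final `else raise ValueError` branch is the
-- value 0 here (those inputs are excluded by Pre_).
def pvCascadeA (m : Int) : Int :=
  if m = 1 then 175
  else if m ≤ 2 then 85
  else if m ≤ 3 then 55
  else if m ≤ 4 then 40
  else if m ≤ 5 then 35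
  else if m ≤ 7 then 25
  else if m ≤ 8 then 20
  else if m ≤ 11 then 15
  else if m ≤ 17 then 10
  else if m ≤ 35 then 5
  else 0

def determine_graph_limits (product_prices : List (Int × Int)) : Int × Int × Int :=
  let s := PySem.Set.ofList (product_prices.map (·.1))
  let num_products : Int := s.length
  -- max(...) over the set of products; a ValueError on the empty input is excluded by Pre_.
  match PySem.List.max? (s.map (fun prod => ((product_prices.filter (fun p => p.1 == prod)).length : Int))) (fun y => y) with
  | none => (0, 0, 0)
  | some max_prices_per_product =>
      (num_products, max_prices_per_product, pvCascadeA max_prices_per_product)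

-- ===== PORT B =====
-- B's breakpoint table scan: first (limit, size) with m ≤ limit; none = ValueError (excluded by Pre_).
def pvLookupB (table : List (Int × Int)) (m : Int) : Option Int :=
  match table with
  | [] => none
  | (limit, size) :: rest => if m ≤ limit then some size else pvLookupB rest m

def determine_graph_limits_alt (product_prices : List (Int × Int)) : Int × Int × Int :=
  let counts := product_prices.foldl
    (fun d p => PySem.Dict.insert d p.1 (PySem.Dict.getD d p.1 0 + 1)) PySem.Dict.empty
  let num_products : Int := PySem.Dict.size counts
  match PySem.List.max? (PySem.Dict.values counts) (fun y => y) with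
  | none => (0, 0, 0)
  | some m =>
      match pvLookupB [(1, 175), (2, 85), (3, 55), (4, 40), (5, 35),
                       (7, 25), (8, 20), (11, 15), (17, 10), (35, 5)] m with
      | some size => (num_products, m, size)
      | none => (0, 0, 0)

-- ===== PRECONDITION & SPEC =====
-- Pre_ excludes exactly the inputs where A raises ValueError: the empty list (max() of an empty
-- sequence) and inputs where some product occurs more than 35 times ("Too many prices per product").
def Pre_determine_graph_limits (product_prices : List (Int × Int)) : Prop :=
  product_prices ≠ [] ∧
  ∀ p ∈ product_prices, (product_prices.map (·.1)).count p.1 ≤ 35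

instance (product_prices : List (Int × Int)) : Decidable (Pre_determine_graph_limits product_prices) := by
  unfold Pre_determine_graph_limits; infer_instance

def pvWitness_determine_graph_limits : (List (Int × Int)) := [(1, 10), (1, 20), (2, 5)]

def Spec_determine_graph_limits (product_prices : List (Int × Int)) (out : Int × Int × Int) : Prop := out = determine_graph_limits_alt product_prices
instance (product_prices : List (Int × Int)) (out : Int × Int × Int) : Decidable (Spec_determine_graph_limits product_prices out) := by unfold Spec_determine_graph_limits; infer_instance

-- ===== CLAIM (what is proved, stated in full; the proofs are below) =====
def Claim_equal_determine_graph_limits : Prop := ∀ (product_prices : List (Int × Int)), Dom_determine_graph_limits product_prices → Pre_determine_graph_limits product_prices → Spec_determine_graph_limits product_prices (determine_graph_limits product_prices)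

-- ===== LEMMAS AND PROOFS =====

-- B's counting loop is Counter(p[0] for p in product_prices).
theorem counts_eq_counter (pp : List (Int × Int)) :
    pp.foldl (fun d p => PySem.Dict.insert d p.1 (PySem.Dict.getD d p.1 0 + 1)) PySem.Dict.empty
      = PySem.Dict.counter (pp.map (·.1)) := by
  rw [← PySem.Dict.foldl_insert_getD_add_one_eq_counter, List.foldl_map]

-- The list B takes the max of equals the list A takes the max of.
theorem values_eq_counts_list (pp : List (Int × Int)) :
    PySem.Dict.values (PySem.Dict.counter (pp.map (·.1)))
      = (PySem.Set.ofList (pp.map (·.1))).map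
          (fun prod => ((pp.filter (fun p => p.1 == prod)).length : Int)) := by
  rw [PySem.Dict.values_eq_map_keys _ (PySem.Dict.nodup_keys_counter _) 0,
      PySem.Dict.keys_counter]
  refine List.map_congr_left (fun k _ => ?_)
  rw [PySem.Dict.getD_counter]
  have : (pp.map (·.1)).count k = (pp.filter (fun p => p.1 == k)).length := by
    rw [List.count, List.countP_map]
    exact List.countP_eq_length_filter
  rw [this]

-- the table lookup agrees with the cascade on 1 ≤ m ≤ 35
theorem lookup_eq_cascade (m : Int) (h1 : 1 ≤ m) (h2 : m ≤ 35) :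
    pvLookupB [(1, 175), (2, 85), (3, 55), (4, 40), (5, 35),
               (7, 25), (8, 20), (11, 15), (17, 10), (35, 5)] m
      = some (pvCascadeA m) := by
  interval_cases m <;> decide

-- ===== VERDICT (by name: the statement is the Claim_ definition above) =====
theorem determine_graph_limits_spec : Claim_equal_determine_graph_limits := by
  intro pp _ hpre
  obtain ⟨-, hcnt⟩ := hpre
  show determine_graph_limits pp = determine_graph_limits_alt pp
  have hsize : (PySem.Dict.counter (pp.map (·.1))).size
      = (PySem.Set.ofList (pp.map (·.1))).length := by
    rw [PySem.Dict.size, ← PySem.Dict.keys_counter (pp.map (·.1)), PySem.Dict.keys,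
      List.length_map]
  cases hmax : PySem.List.max? ((PySem.Set.ofList (pp.map (·.1))).map
      (fun prod => ((pp.filter (fun p => p.1 == prod)).length : Int))) (fun y => y) with
  | none =>
      simp only [determine_graph_limits, determine_graph_limits_alt, counts_eq_counter,
        values_eq_counts_list, hmax]
  | some m =>
      have hmem := PySem.List.max?_mem hmax
      rw [List.mem_map] at hmem
      obtain ⟨k, hk, hkm⟩ := hmem
      rw [PySem.Set.mem_ofList, List.mem_map] at hk
      obtain ⟨p, hp, hpk⟩ := hk
      have hcount : (pp.filter (fun q => q.1 == k)).length = (pp.map (·.1)).count k := by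
        rw [List.count, List.countP_map]
        exact List.countP_eq_length_filter.symm
      -- 1 ≤ m : p itself is in the filtered list
      have h1 : 1 ≤ m := by
        have hpf : p ∈ pp.filter (fun q => q.1 == k) := by
          rw [List.mem_filter]; exact ⟨hp, by simp [hpk]⟩
        have := List.length_pos_of_mem hpf
        omega
      -- m ≤ 35 : m is the count of product k = p.1
      have h2 : m ≤ 35 := by
        have hc := hcnt p hp
        rw [hpk] at hc
        omega
      simp only [determine_graph_limits, determine_graph_limits_alt, counts_eq_counter,
        values_eq_counts_list, hmax, hsize, lookup_eq_cascade m h1 h2]
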